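-- pv_equiv track=rewrite | github.com/AdamZhouSE/pythonHomework | Code/CodeRecords/2687/60716/276227.py | binary_T
-- ===== SOURCE A (Python) =====
-- def binary_T(number:int):
--     index = 0
--     temp10 = 0
--     temp01 = 0
--     while True:
--         if temp10 == number or temp01 == number:
--             return True
--         elif temp10 >number and temp01 > number:
--             return False
--         else:
--             if index%2==0:
--                 temp10 += (2**index)
--                 index += 1
--             else:
--                 temp01 += (2**index)
--                 index += 1
-- ===== SOURCE B (Python) =====
-- def binary_T(number: int):
--     def is_pow4(m: int) -> bool:
--         while m > 1 and m % 4 == 0: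
--             m //= 4
--         return m == 1
--     return is_pow4(3 * number + 1) or (number % 2 == 0 and is_pow4(3 * (number // 2) + 1))
-- ===== Notes on version B (the rewrite author's own statement) =====
-- stated objective: simpler
-- what changed: B replaces A's interleaved even/odd partial-sum accumulator loop by a closed-form membership test: number is in one of the two geometric-sum families iff 3*number+1 (or, for even number, 3*(number//2)+1) is a power of 4, checked by repeated exact division.
import Mathlib
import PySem

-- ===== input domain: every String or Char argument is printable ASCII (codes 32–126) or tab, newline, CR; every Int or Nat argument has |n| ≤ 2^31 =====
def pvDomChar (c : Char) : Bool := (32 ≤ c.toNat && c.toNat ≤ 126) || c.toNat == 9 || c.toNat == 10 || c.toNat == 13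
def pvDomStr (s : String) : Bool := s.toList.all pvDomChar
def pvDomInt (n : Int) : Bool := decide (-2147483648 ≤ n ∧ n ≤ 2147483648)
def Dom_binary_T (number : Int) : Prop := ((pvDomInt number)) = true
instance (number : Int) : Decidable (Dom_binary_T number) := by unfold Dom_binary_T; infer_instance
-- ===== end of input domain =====

-- B replaces A's interleaved even/odd partial-sum accumulator loop by a direct
-- closed-form membership test via a power-of-4 predicate (objective: simpler).

-- ===== PORT A =====
-- A's `while True` loop: state (index, temp10, temp01), branches in A's order.
-- The fuel argument only makes the recursion total; `2 * number.toNat + 4`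
-- iterations always suffice (proved below), so it never changes the result.
def pvLoopA : Nat → Int → Nat → Int → Int → Bool
  | 0, _, _, _, _ => false
  | fuel + 1, n, idx, t10, t01 =>
    if t10 = n ∨ t01 = n then true
    else if t10 > n ∧ t01 > n then false
    else if idx % 2 = 0 then pvLoopA fuel n (idx + 1) (t10 + 2 ^ idx) t01
    else pvLoopA fuel n (idx + 1) t10 (t01 + 2 ^ idx)

def binary_T (number : Int) : Bool := pvLoopA (2 * number.toNat + 4) number 0 0 0

-- ===== PORT B =====
-- B's is_pow4: strip factors of 4 while possible, then compare with 1.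
-- Again the fuel (m.toNat + 1 divisions always suffice) only makes it total.
def pvIsPow4 : Nat → Int → Bool
  | 0, _ => false
  | fuel + 1, m =>
    if 1 < m ∧ PySem.Int.mod m 4 = 0 then pvIsPow4 fuel (PySem.Int.floordiv m 4) else m == 1

def binary_T_alt (number : Int) : Bool :=
  pvIsPow4 ((3 * number + 1).toNat + 1) (3 * number + 1) ||
    (PySem.Int.mod number 2 == 0 &&
      pvIsPow4 ((3 * PySem.Int.floordiv number 2 + 1).toNat + 1)
        (3 * PySem.Int.floordiv number 2 + 1))

-- ===== PRECONDITION & SPEC =====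
def Spec_binary_T (number : Int) (out : Bool) : Prop := out = binary_T_alt number
instance (number : Int) (out : Bool) : Decidable (Spec_binary_T number out) := by unfold Spec_binary_T; infer_instance

-- ===== CLAIM (what is proved, stated in full; the proofs are below) =====
def Claim_equal_binary_T : Prop := ∀ (number : Int), Dom_binary_T number → Spec_binary_T number (binary_T number)

-- ===== LEMMAS AND PROOFS =====

-- pvA k = 1 + 4 + … + 4^(k-1): A's temp10 after k even steps (temp01 = 2 * pvA k).
def pvA : Nat → Int
  | 0 => 0
  | k + 1 => pvA k + 4 ^ k

theorem pvA_nonneg (k : Nat) : 0 ≤ pvA k := by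
  induction k with
  | zero => simp [pvA]
  | succ k ih => have := pow_pos (show (0:Int) < 4 by norm_num) k; rw [pvA]; omega

theorem pvA_lt_succ (k : Nat) : pvA k < pvA (k + 1) := by
  have := pow_pos (show (0:Int) < 4 by norm_num) k
  rw [pvA]; omega

theorem pvA_mono {k j : Nat} (h : k ≤ j) : pvA k ≤ pvA j := by
  induction h with
  | refl => exact le_rfl
  | step h ih => exact le_trans ih (le_of_lt (pvA_lt_succ _))

theorem pvA_formula (k : Nat) : 3 * pvA k + 1 = 4 ^ k := by
  induction k with
  | zero => simp [pvA]
  | succ k ih => rw [pvA, pow_succ]; ring_nf; ring_nf at ih; omega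

theorem isPow4_iff (fuel : Nat) (m : Int) (hf : m.toNat < fuel) :
    pvIsPow4 fuel m = true ↔ ∃ k : Nat, m = 4 ^ k := by
  induction fuel generalizing m with
  | zero => omega
  | succ fuel ih =>
    rw [pvIsPow4]
    by_cases h : 1 < m ∧ PySem.Int.mod m 4 = 0
    · obtain ⟨h1, h2⟩ := h
      rw [PySem.Int.mod_eq_emod_of_pos (by norm_num)] at h2
      rw [if_pos ⟨h1, by rw [PySem.Int.mod_eq_emod_of_pos (by norm_num)]; exact h2⟩]
      rw [PySem.Int.floordiv_eq_ediv_of_pos (by norm_num)]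
      rw [ih (m / 4) (by omega)]
      constructor
      · rintro ⟨k, hk⟩
        exact ⟨k + 1, by rw [pow_succ]; omega⟩
      · rintro ⟨k, hk⟩
        cases k with
        | zero => simp at hk; omega
        | succ k =>
          refine ⟨k, ?_⟩
          rw [pow_succ] at hk
          omega
    · rw [if_neg h]
      simp only [beq_iff_eq]
      constructor
      · rintro rfl; exact ⟨0, by norm_num⟩
      · rintro ⟨k, rfl⟩
        cases k with
        | zero => norm_num
        | succ k =>
          exfalso
          apply h
          have hpos := pow_pos (show (0:Int) < 4 by norm_num) k
          rw [pow_succ]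
          constructor
          · nlinarith
          · rw [PySem.Int.mod_eq_emod_of_pos (by norm_num)]
            omega

theorem loopA_past (fuel : Nat) (k : Nat) (n : Int) (hgt : n < pvA k) :
    pvLoopA (fuel + 1) n (2 * k) (pvA k) (2 * pvA k) = false := by
  have h0 := pvA_nonneg k
  rw [pvLoopA, if_neg (by omega), if_pos (by omega)]

theorem loopA_rhs_past (k : Nat) (n : Int) (hgt : n < pvA k) :
    ¬ ∃ j, k ≤ j ∧ (n = pvA j ∨ n = 2 * pvA j) := by
  rintro ⟨j, hkj, hj⟩
  have hmono := pvA_mono hkj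
  have h0 := pvA_nonneg j
  omega

theorem pow_two_even (k : Nat) : (2:Int) ^ (2 * k) = 4 ^ k := by
  rw [pow_mul]; norm_num

theorem loopA_iff : ∀ (fuel : Nat) (k : Nat) (n : Int),
    2 * (n + 1 - pvA k).toNat + 2 ≤ fuel →
    (pvLoopA fuel n (2 * k) (pvA k) (2 * pvA k) = true ↔
      ∃ j, k ≤ j ∧ (n = pvA j ∨ n = 2 * pvA j)) := by
  intro fuel
  induction fuel using Nat.strong_induction_on with
  | _ fuel ih =>
    intro k n hfuel
    match fuel, hfuel with
    | f + 2, hfuel =>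
      by_cases hlt : n < pvA k
      · rw [loopA_past (f + 1) k n hlt]
        exact iff_of_false (by simp) (loopA_rhs_past k n hlt)
      · rw [not_lt] at hlt
        by_cases hC1 : pvA k = n ∨ 2 * pvA k = n
        · rw [pvLoopA, if_pos hC1]
          refine iff_of_true rfl ?_
          rcases hC1 with h | h
          · exact ⟨k, le_refl k, Or.inl h.symm⟩
          · exact ⟨k, le_refl k, Or.inr h.symm⟩
        · have h0 := pvA_nonneg k
          have hsucc := pvA_lt_succ k
          rw [pvLoopA, if_neg hC1, if_neg (by omega), if_pos (by omega)]
          have hstep1 : pvA k + 2 ^ (2 * k) = pvA (k + 1) := by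
            rw [pow_two_even]; simp [pvA]
          rw [hstep1]
          by_cases hC1' : pvA (k + 1) = n ∨ 2 * pvA k = n
          · rw [pvLoopA, if_pos hC1']
            have : pvA (k + 1) = n := by tauto
            exact iff_of_true rfl ⟨k + 1, by omega, Or.inl this.symm⟩
          · by_cases hC2' : pvA (k + 1) > n ∧ 2 * pvA k > n
            · rw [pvLoopA, if_neg hC1', if_pos hC2']
              refine iff_of_false (by simp) ?_
              rintro ⟨j, hkj, hj⟩
              rcases Nat.eq_or_lt_of_le hkj with rfl | hkj'
              · omega
              · have hmono := pvA_mono (show k + 1 ≤ j by omega)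
                have h0j := pvA_nonneg j
                omega
            · rw [pvLoopA, if_neg hC1', if_neg hC2', if_neg (by omega)]
              have hstep2 : 2 * pvA k + 2 ^ (2 * k + 1) = 2 * pvA (k + 1) := by
                rw [pow_succ, pow_two_even]; simp [pvA]; ring
              rw [hstep2]
              have harg : (2 * k + 1) + 1 = 2 * (k + 1) := by omega
              rw [harg]
              have hrec := ih f (by omega) (k + 1) n (by omega)
              rw [hrec]
              constructor
              · rintro ⟨j, hkj, hj⟩; exact ⟨j, by omega, hj⟩
              · rintro ⟨j, hkj, hj⟩
                rcases Nat.eq_or_lt_of_le hkj with rfl | hkj'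
                · exfalso
                  rcases hj with h | h
                  · exact hC1 (Or.inl h.symm)
                  · exact hC1 (Or.inr h.symm)
                · exact ⟨j, by omega, hj⟩

theorem binary_T_dest (n : Int) : binary_T n = true ↔ ∃ j : Nat, n = pvA j ∨ n = 2 * pvA j := by
  have h := loopA_iff (2 * n.toNat + 4) 0 n (by simp [pvA]; omega)
  simp only [pvA] at h
  norm_num at h
  unfold binary_T
  rw [h]

theorem binary_T_alt_dest (n : Int) : binary_T_alt n = true ↔ ∃ j : Nat, n = pvA j ∨ n = 2 * pvA j := by
  unfold binary_T_alt
  simp only [Bool.or_eq_true, Bool.and_eq_true, beq_iff_eq]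
  rw [isPow4_iff _ _ (by omega), isPow4_iff _ _ (by omega)]
  rw [PySem.Int.mod_eq_emod_of_pos (show (0:Int) < 2 by norm_num),
      PySem.Int.floordiv_eq_ediv_of_pos (show (0:Int) < 2 by norm_num)]
  constructor
  · rintro (⟨k, hk⟩ | ⟨heven, k, hk⟩)
    · have := pvA_formula k
      exact ⟨k, Or.inl (by omega)⟩
    · have := pvA_formula k
      refine ⟨k, Or.inr ?_⟩
      omega
  · rintro ⟨j, hj | hj⟩
    · left
      exact ⟨j, by have := pvA_formula j; omega⟩
    · right
      have := pvA_formula j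
      exact ⟨by omega, j, by omega⟩

-- ===== VERDICT (by name: the statement is the Claim_ definition above) =====
theorem binary_T_spec : Claim_equal_binary_T := by
  intro n _
  unfold Spec_binary_T
  have h1 := binary_T_dest n
  have h2 := binary_T_alt_dest n
  cases hA : binary_T n <;> cases hB : binary_T_alt n <;> simp_all
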